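-- pv_equiv track=rewrite | github.com/Misaki-Akeno/QuantTools | main.py | _categorize_existing_orders
-- ===== SOURCE A (Python) =====
-- from typing import Any, List, Optional, Sequence, Tuple, cast
--
-- PROTECTIVE_ORDER_TYPES = {"STOP", "STOP_MARKET", "TAKE_PROFIT", "TAKE_PROFIT_MARKET"}
--
-- def _categorize_existing_orders(
--     orders: Sequence[dict[str, Any]]
-- ) -> Tuple[List[dict[str, Any]], List[dict[str, Any]], List[dict[str, Any]]]:
--     grid_orders: List[dict[str, Any]] = []
--     tp_orders: List[dict[str, Any]] = []
--     sl_orders: List[dict[str, Any]] = []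
--     for order in orders:
--         order_type = str(order.get("type", "")).upper()
--         side = str(order.get("side", "")).upper()
--         if order_type in PROTECTIVE_ORDER_TYPES:
--             if side == "SELL":
--                 tp_orders.append(order)
--             else:
--                 sl_orders.append(order)
--         else:
--             grid_orders.append(order)
--     return grid_orders, tp_orders, sl_orders
-- ===== SOURCE B (Python) =====
-- PROTECTIVE_ORDER_TYPES = {"STOP", "STOP_MARKET", "TAKE_PROFIT", "TAKE_PROFIT_MARKET"}
--
-- def _is_protective(order):
--     return str(order.get("type", "")).upper() in PROTECTIVE_ORDER_TYPES
--
-- def _is_sell(order):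
--     return str(order.get("side", "")).upper() == "SELL"
--
-- def _categorize_existing_orders(orders):
--     grid_orders = [o for o in orders if not _is_protective(o)]
--     tp_orders = [o for o in orders if _is_protective(o) and _is_sell(o)]
--     sl_orders = [o for o in orders if _is_protective(o) and not _is_sell(o)]
--     return grid_orders, tp_orders, sl_orders
-- ===== Notes on version B (the rewrite author's own statement) =====
-- stated objective: simpler
-- what changed: Replaces the single stateful dispatch loop maintaining three accumulators with three independent declarative filtered scans of the input, one per bucket.
import Mathlib
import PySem

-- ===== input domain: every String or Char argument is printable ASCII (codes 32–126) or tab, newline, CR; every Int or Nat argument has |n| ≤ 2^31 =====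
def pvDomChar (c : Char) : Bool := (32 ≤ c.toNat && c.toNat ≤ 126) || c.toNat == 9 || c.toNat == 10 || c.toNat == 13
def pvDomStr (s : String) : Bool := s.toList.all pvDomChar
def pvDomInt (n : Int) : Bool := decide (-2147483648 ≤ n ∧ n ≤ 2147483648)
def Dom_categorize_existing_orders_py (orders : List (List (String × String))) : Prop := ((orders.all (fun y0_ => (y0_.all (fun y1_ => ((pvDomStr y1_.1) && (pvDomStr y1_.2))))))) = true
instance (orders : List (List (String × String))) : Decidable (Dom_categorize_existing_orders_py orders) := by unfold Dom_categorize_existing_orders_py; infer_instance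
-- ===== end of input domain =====

-- B replaces A's single dispatch loop over three accumulators with three independent
-- filtered scans of the input (objective: simpler). Return value only; no mutation.

-- ===== PORT A =====
-- order.get(k, "") on the association-list dict: first match, default ""
def pvOrderGet (order : List (String × String)) (k : String) : String :=
  ((order.find? (fun p => p.1 == k)).map (fun p => p.2)).getD ""

def pvProtective : List String := ["STOP", "STOP_MARKET", "TAKE_PROFIT", "TAKE_PROFIT_MARKET"]

-- one iteration of A's loop body
def pvStepA (acc : (List (List (String × String))) × (List (List (String × String))) × (List (List (String × String)))) (order : List (String × String)) : (List (List (String × String))) × (List (List (String × String))) × (List (List (String × String))) :=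
  let order_type := PySem.Str.upper (pvOrderGet order "type")
  let side := PySem.Str.upper (pvOrderGet order "side")
  if order_type ∈ pvProtective then
    if side == "SELL" then (acc.1, acc.2.1 ++ [order], acc.2.2)
    else (acc.1, acc.2.1, acc.2.2 ++ [order])
  else (acc.1 ++ [order], acc.2.1, acc.2.2)

def categorize_existing_orders_py (orders : List (List (String × String))) : (List (List (String × String))) × (List (List (String × String))) × (List (List (String × String))) :=
  orders.foldl pvStepA ([], [], [])

-- ===== PORT B =====
def pvIsProtective (order : List (String × String)) : Bool :=
  decide (PySem.Str.upper (pvOrderGet order "type") ∈ pvProtective)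

def pvIsSell (order : List (String × String)) : Bool :=
  PySem.Str.upper (pvOrderGet order "side") == "SELL"

def categorize_existing_orders_py_alt (orders : List (List (String × String))) : (List (List (String × String))) × (List (List (String × String))) × (List (List (String × String))) :=
  (orders.filter (fun o => !(pvIsProtective o)),
   orders.filter (fun o => pvIsProtective o && pvIsSell o),
   orders.filter (fun o => pvIsProtective o && !(pvIsSell o)))

-- ===== PRECONDITION & SPEC =====
def Spec_categorize_existing_orders_py (orders : List (List (String × String))) (out : (List (List (String × String))) × (List (List (String × String))) × (List (List (String × String)))) : Prop := out = categorize_existing_orders_py_alt orders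
instance (orders : List (List (String × String))) (out : (List (List (String × String))) × (List (List (String × String))) × (List (List (String × String)))) : Decidable (Spec_categorize_existing_orders_py orders out) := by unfold Spec_categorize_existing_orders_py; infer_instance

-- ===== CLAIM (what is proved, stated in full; the proofs are below) =====
def Claim_equal_categorize_existing_orders_py : Prop := ∀ (orders : List (List (String × String))), Dom_categorize_existing_orders_py orders → Spec_categorize_existing_orders_py orders (categorize_existing_orders_py orders)

-- ===== LEMMAS AND PROOFS =====
-- Loop invariant: A's fold with accumulators (g, t, s) equals the prefixes
-- already collected followed by B's three filters of the remaining input.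
theorem pv_fold_eq_filters (orders : List (List (String × String)))
    (g t s : List (List (String × String))) :
    orders.foldl pvStepA (g, t, s)
    = (g ++ orders.filter (fun o => !(pvIsProtective o)),
       t ++ orders.filter (fun o => pvIsProtective o && pvIsSell o),
       s ++ orders.filter (fun o => pvIsProtective o && !(pvIsSell o))) := by
  induction orders generalizing g t s with
  | nil => simp
  | cons o rest ih =>
    simp only [List.foldl_cons, List.filter_cons]
    by_cases hp : PySem.Str.upper (pvOrderGet o "type") ∈ pvProtective
    · by_cases hs : (PySem.Str.upper (pvOrderGet o "side") == "SELL") = true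
      · have hstep : pvStepA (g, t, s) o = (g, t ++ [o], s) := by
          simp [pvStepA, hp, hs]
        rw [hstep, ih]
        simp [pvIsProtective, pvIsSell, hp, hs]
      · have hstep : pvStepA (g, t, s) o = (g, t, s ++ [o]) := by
          simp [pvStepA, hp]
          simp_all
        rw [hstep, ih]
        simp [pvIsProtective, pvIsSell, hp, hs]
    · have hstep : pvStepA (g, t, s) o = (g ++ [o], t, s) := by
        simp [pvStepA, hp]
      rw [hstep, ih]
      simp [pvIsProtective, hp]

-- ===== VERDICT (by name: the statement is the Claim_ definition above) =====
theorem categorize_existing_orders_py_spec : Claim_equal_categorize_existing_orders_py := by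
  intro orders _
  unfold Spec_categorize_existing_orders_py categorize_existing_orders_py categorize_existing_orders_py_alt
  simpa using pv_fold_eq_filters orders [] [] []
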